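-- pv_equiv track=rewrite | github.com/enricotomasi/GeeksforGeeks_problems | Easy/Maximum number of partitions that can be sorted individually to make sorted.py | maxPartitions
-- ===== SOURCE A (Python) =====
-- def maxPartitions (arr, n) :
--     #Complete the function
--
--     # The idea is based on the fact that if an element arr[i] is maximum of prefix arr[0..i],
--     # then we can make a partition ending with arr[i].
--
--     temp = arr[0]
--     ans = 0
--
--     for i in range(n):
--         if temp < arr[i]:
--             temp = arr[i]
--         if temp == i:
--             ans += 1
--
--     return ans
-- ===== SOURCE B (Python) =====
-- def maxPartitions(arr, n):
--     # Build the prefix-maximum table over arr[0..n-1], then count the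
--     # indices where the prefix maximum equals the index.
--     pref = []
--     for i in range(n):
--         pref.append(arr[i] if not pref else max(pref[-1], arr[i]))
--     return sum(1 for i in range(len(pref)) if pref[i] == i)
-- ===== Notes on version B (the rewrite author's own statement) =====
-- stated objective: alternative
-- what changed: A's single interleaved update-and-test loop is replaced by two separate passes: first build the prefix-maximum table, then count indices i with pref[i] == i.
import Mathlib
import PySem

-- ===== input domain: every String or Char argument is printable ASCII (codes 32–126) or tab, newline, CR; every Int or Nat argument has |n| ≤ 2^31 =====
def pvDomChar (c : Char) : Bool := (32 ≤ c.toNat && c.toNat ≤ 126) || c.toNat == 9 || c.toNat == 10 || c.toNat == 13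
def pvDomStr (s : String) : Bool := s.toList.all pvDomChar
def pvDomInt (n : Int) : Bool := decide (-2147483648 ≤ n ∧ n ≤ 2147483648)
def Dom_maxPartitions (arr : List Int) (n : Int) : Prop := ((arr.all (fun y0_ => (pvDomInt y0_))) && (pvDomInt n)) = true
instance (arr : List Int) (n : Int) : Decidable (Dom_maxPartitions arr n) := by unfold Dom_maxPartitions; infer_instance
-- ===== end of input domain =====

-- B replaces A's single interleaved update-and-test loop by two separate passes:
-- build the prefix-maximum table, then count indices i with pref[i] == i (objective: alternative decomposition).

-- ===== PORT A =====
def maxPartitions (arr : List Int) (n : Int) : Int :=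
  -- temp = arr[0]  (arr[0] raises on empty arr: excluded by Pre_)
  let temp := PySem.List.pyGetD arr 0 0
  -- for i in range(n): if temp < arr[i]: temp = arr[i]; if temp == i: ans += 1
  let s := (PySem.List.pyRange 0 n 1).foldl
    (fun (s : Int × Int) (i : Int) =>
      let t := if s.1 < PySem.List.pyGetD arr i 0 then PySem.List.pyGetD arr i 0 else s.1
      (t, if t == i then s.2 + 1 else s.2)) (temp, 0)
  s.2

-- ===== PORT B =====
def maxPartitions_alt (arr : List Int) (n : Int) : Int :=
  -- pref = []; for i in range(n): pref.append(arr[i] if not pref else max(pref[-1], arr[i]))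
  let pref := (PySem.List.pyRange 0 n 1).foldl
    (fun (p : List Int) (i : Int) =>
      p ++ [if p.isEmpty then PySem.List.pyGetD arr i 0
            else max (PySem.List.pyGetD p (-1) 0) (PySem.List.pyGetD arr i 0)]) []
  -- return sum(1 for i in range(len(pref)) if pref[i] == i)
  (PySem.List.pyRange 0 (pref.length : Int) 1).foldl
    (fun (ans : Int) (i : Int) => if PySem.List.pyGetD pref i 0 == i then ans + 1 else ans) 0

-- ===== PRECONDITION & SPEC =====
-- Python A raises IndexError exactly when arr is empty (temp = arr[0]) or n > len(arr) (arr[i]).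
def Pre_maxPartitions (arr : List Int) (n : Int) : Prop := arr ≠ [] ∧ n ≤ (arr.length : Int)
instance (arr : List Int) (n : Int) : Decidable (Pre_maxPartitions arr n) := by unfold Pre_maxPartitions; infer_instance
def pvWitness_maxPartitions : List Int × Int := ([0, 2, 1], 3)

def Spec_maxPartitions (arr : List Int) (n : Int) (out : Int) : Prop := out = maxPartitions_alt arr n
instance (arr : List Int) (n : Int) (out : Int) : Decidable (Spec_maxPartitions arr n out) := by unfold Spec_maxPartitions; infer_instance

-- ===== CLAIM (what is proved, stated in full; the proofs are below) =====
def Claim_equal_maxPartitions : Prop := ∀ (arr : List Int) (n : Int), Dom_maxPartitions arr n → Pre_maxPartitions arr n → Spec_maxPartitions arr n (maxPartitions arr n)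

-- ===== LEMMAS AND PROOFS =====

-- prefix maximum of a 0 .. a k
def pvPM (a : Int → Int) : Nat → Int
  | 0 => a 0
  | k+1 => max (pvPM a k) (a (k+1))

lemma pv_lemA (a : Int → Int) : ∀ (k : Nat) (c : Int),
    (PySem.List.pyRange 0 ((k : Int)+1) 1).foldl
      (fun (s : Int × Int) (i : Int) =>
        let t := if s.1 < a i then a i else s.1
        (t, if t == i then s.2 + 1 else s.2)) (a 0, c)
    = (pvPM a k, c + (((List.range (k+1)).filter (fun i => pvPM a i == (i : Int))).length : Int)) := by
  intro k
  induction k with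
  | zero =>
    intro c
    rw [show ((0:Nat):Int)+1 = 0+1 by norm_num, PySem.List.pyRange_one_singleton]
    by_cases hf : pvPM a 0 = (0:Int) <;>
      simp [pvPM, List.range_succ] <;> simp_all [pvPM]
  | succ k ih =>
    intro c
    rw [show ((k+1:Nat):Int)+1 = ((k:Int)+1)+1 by push_cast; ring]
    rw [PySem.List.pyRange_one_succ_right (show (0:Int) ≤ (k:Int)+1 by omega), List.foldl_append, ih]
    have hmax : (if pvPM a k < a ((k:Int)+1) then a ((k:Int)+1) else pvPM a k) = pvPM a (k+1) := by
      simp only [pvPM]; rcases lt_trichotomy (pvPM a k) (a ((k:Int)+1)) with h|h|h <;>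
        simp [h, max_def] <;> omega
    have hrng : List.range (k+1+1) = List.range (k+1) ++ [k+1] := List.range_succ
    have hcast : ((k+1:Nat):Int) = (k:Int)+1 := by push_cast; ring
    by_cases hf : pvPM a (k+1) = ((k:Int)+1)
    · simp [hrng, hmax, hf, hcast]; ring
    · simp [hrng, hmax, hf, hcast]

lemma pv_lemB1 (a : Int → Int) : ∀ (k : Nat),
    (PySem.List.pyRange 0 ((k : Int)+1) 1).foldl
      (fun (p : List Int) (i : Int) =>
        p ++ [if p.isEmpty then a i else max (PySem.List.pyGetD p (-1) 0) (a i)]) []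
    = (List.range (k+1)).map (pvPM a) := by
  intro k
  induction k with
  | zero =>
    rw [show ((0:Nat):Int)+1 = 0+1 by norm_num, PySem.List.pyRange_one_singleton]
    simp [List.range_succ, pvPM]
  | succ k ih =>
    rw [show ((k+1:Nat):Int)+1 = ((k:Int)+1)+1 by push_cast; ring]
    rw [PySem.List.pyRange_one_succ_right (show (0:Int) ≤ (k:Int)+1 by omega), List.foldl_append, ih]
    have hne : ((List.range (k+1)).map (pvPM a)).isEmpty = false := by simp
    have hlast : PySem.List.pyGetD ((List.range (k+1)).map (pvPM a)) (-1) 0 = pvPM a k := by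
      rw [List.range_succ, List.map_append]
      exact PySem.List.pyGetD_neg_one_append_singleton _ _ _
    simp only [List.foldl_cons, List.foldl_nil, hne, hlast, Bool.false_eq_true, if_false]
    rw [show (List.range (k+1+1)).map (pvPM a) = (List.range (k+1)).map (pvPM a) ++ [pvPM a (k+1)] by
      rw [List.range_succ, List.map_append]; rfl]
    simp [pvPM]

lemma pv_lemB2 (p : List Int) : ∀ (k : Nat) (c : Int),
    (PySem.List.pyRange 0 (k : Int) 1).foldl
      (fun (ans : Int) (i : Int) => if PySem.List.pyGetD p i 0 == i then ans + 1 else ans) c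
    = c + (((List.range k).filter (fun i => p.getD i 0 == (i : Int))).length : Int) := by
  intro k
  induction k with
  | zero => intro c; simp [PySem.List.pyRange_one_eq_nil]
  | succ k ih =>
    intro c
    have h : ((k+1 : Nat) : Int) = (k : Int) + 1 := by push_cast; ring
    rw [h, PySem.List.pyRange_one_succ_right (show (0:Int) ≤ (k:Int) by omega), List.foldl_append, ih]
    by_cases hf : p[k]?.getD 0 = (k : Int)
    · simp [hf, List.range_succ]; ring
    · simp [hf, List.range_succ]


lemma pv_main (arr : List Int) (n : Int) : maxPartitions arr n = maxPartitions_alt arr n := by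
  by_cases h : n ≤ 0
  · simp [maxPartitions, maxPartitions_alt, PySem.List.pyRange_one_eq_nil h]
  · obtain ⟨k, hk⟩ : ∃ k : Nat, n = (k:Int)+1 := ⟨(n-1).toNat, by omega⟩
    subst hk
    show (List.foldl _ (PySem.List.pyGetD arr 0 0, 0) _).2 = _
    rw [pv_lemA (fun i => PySem.List.pyGetD arr i 0) k 0]
    simp only [maxPartitions_alt]
    rw [pv_lemB1 (fun i => PySem.List.pyGetD arr i 0) k]
    simp only [List.length_map, List.length_range]
    rw [pv_lemB2 ((List.range (k+1)).map (pvPM (fun i => PySem.List.pyGetD arr i 0))) (k+1) 0]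
    have hfilter : (List.range (k+1)).filter
        (fun i => ((List.range (k+1)).map (pvPM (fun i => PySem.List.pyGetD arr i 0))).getD i 0 == (i:Int))
        = (List.range (k+1)).filter (fun i => pvPM (fun i => PySem.List.pyGetD arr i 0) i == (i:Int)) := by
      apply List.filter_congr
      intro i hi
      have hi' : i < k+1 := List.mem_range.mp hi
      simp [List.getD_eq_getElem?_getD, hi']
    rw [hfilter]

-- ===== VERDICT (by name: the statement is the Claim_ definition above) =====
theorem maxPartitions_spec : Claim_equal_maxPartitions := by
  intro arr n _ _
  exact (pv_main arr n).symm ▸ rfl
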